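-- pv_equiv track=rewrite | github.com/crossroad777/SoloTab | backend/guitar_cost_functions.py | get_finger_candidates
-- ===== SOURCE A (Python) =====
-- from typing import List, Tuple, Optional
--
-- def get_finger_candidates(f: int) -> List[int]:
--     """
--     §4.2: フレットfに対して可能な指を返す。
--     指: 0=なし(開放弦), 1=人差し, 2=中, 3=薬, 4=小指
--     """
--     if f == 0:
--         return [0]  # 開放弦: 指なし
--     fingers = []
--     for finger in range(1, 5):
--         # このフレットをこの指で押さえるとポジションは position = f - (finger - 1)
--         position = f - (finger - 1)
--         if position >= 1:
--             fingers.append(finger)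
--     return fingers if fingers else [1]
-- ===== SOURCE B (Python) =====
-- def get_finger_candidates(f: int) -> list:
--     # Recursive decomposition: base cases at the boundaries, and in the middle
--     # range the answer for f extends the answer for f-1 by the finger f.
--     if f == 0:
--         return [0]
--     if f >= 4:
--         return [1, 2, 3, 4]
--     if f <= 1:
--         return [1]
--     return get_finger_candidates(f - 1) + [f]
-- ===== Notes on version B (the rewrite author's own statement) =====
-- stated objective: alternative
-- what changed: Replaces A's per-finger loop testing position = f-(finger-1) >= 1 with a recursive decomposition: boundary base cases ([0] for f=0, [1,2,3,4] for f>=4, [1] for f<=1) and a recursive step candidates(f) = candidates(f-1) + [f] in the middle range.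
import Mathlib
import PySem

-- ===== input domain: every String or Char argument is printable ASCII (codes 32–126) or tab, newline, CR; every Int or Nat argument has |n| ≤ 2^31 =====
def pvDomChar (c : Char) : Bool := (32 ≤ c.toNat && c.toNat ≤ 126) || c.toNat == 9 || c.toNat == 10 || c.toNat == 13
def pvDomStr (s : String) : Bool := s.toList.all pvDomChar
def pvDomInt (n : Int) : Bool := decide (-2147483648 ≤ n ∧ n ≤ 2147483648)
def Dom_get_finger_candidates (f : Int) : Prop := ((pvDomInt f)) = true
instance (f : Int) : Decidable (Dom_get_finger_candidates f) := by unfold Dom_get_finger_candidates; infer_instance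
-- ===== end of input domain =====

-- B replaces A's per-finger loop with a recursive decomposition (boundary base cases plus
-- candidates(f) = candidates(f-1) ++ [f] in the middle range); objective: alternative.

-- ===== PORT A =====
def get_finger_candidates (f : Int) : List Int :=
  if f = 0 then [0]
  else
    let fingers := (PySem.List.pyRange 1 5 1).foldl (fun fingers finger =>
      let position := f - (finger - 1)
      if position ≥ 1 then fingers ++ [finger] else fingers) []
    if fingers ≠ [] then fingers else [1]

-- ===== PORT B =====
def get_finger_candidates_alt (f : Int) : List Int :=
  if f = 0 then [0]
  else if f ≥ 4 then [1, 2, 3, 4]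
  else if f ≤ 1 then [1]
  else get_finger_candidates_alt (f - 1) ++ [f]
termination_by f.toNat
decreasing_by
  rename_i _ h4 h1
  simp only [Int.lt_toNat, Int.toNat_of_nonneg (by omega : (0:Int) ≤ f - 1)]
  omega

-- ===== PRECONDITION & SPEC =====
def Spec_get_finger_candidates (f : Int) (out : List Int) : Prop := out = get_finger_candidates_alt f
instance (f : Int) (out : List Int) : Decidable (Spec_get_finger_candidates f out) := by unfold Spec_get_finger_candidates; infer_instance

-- ===== CLAIM (what is proved, stated in full; the proofs are below) =====
def Claim_equal_get_finger_candidates : Prop := ∀ (f : Int), Dom_get_finger_candidates f → Spec_get_finger_candidates f (get_finger_candidates f)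

-- ===== LEMMAS AND PROOFS =====
theorem pvAlt1 : get_finger_candidates_alt 1 = [1] := by
  rw [get_finger_candidates_alt]; norm_num

theorem pvAlt2 : get_finger_candidates_alt 2 = [1, 2] := by
  rw [get_finger_candidates_alt]; norm_num [pvAlt1]

theorem pvAlt3 : get_finger_candidates_alt 3 = [1, 2, 3] := by
  rw [get_finger_candidates_alt]; norm_num [pvAlt2]

-- ===== VERDICT (by name: the statement is the Claim_ definition above) =====
theorem get_finger_candidates_spec : Claim_equal_get_finger_candidates := by
  intro f _
  unfold Spec_get_finger_candidates
  by_cases h0 : f = 0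
  · simp [get_finger_candidates, get_finger_candidates_alt, h0]
  · have hr5 : PySem.List.pyRange 1 5 1 = [1, 2, 3, 4] := by decide
    by_cases h4 : 4 ≤ f
    · have c1 : (1:Int) ≤ f := by omega
      have c2 : (1:Int) < f := by omega
      have c3 : (1:Int) ≤ f - 2 := by omega
      have c4 : (1:Int) ≤ f - 3 := by omega
      rw [get_finger_candidates_alt]
      simp [get_finger_candidates, hr5, List.foldl, h0, h4, ge_iff_le, c1, c2, c3, c4]
    · by_cases h1 : f < 1
      · have c1 : ¬ ((1:Int) ≤ f) := by omega
        have c2 : ¬ ((1:Int) < f) := by omega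
        have c3 : ¬ ((1:Int) ≤ f - 2) := by omega
        have c4 : ¬ ((1:Int) ≤ f - 3) := by omega
        rw [get_finger_candidates_alt]
        simp [get_finger_candidates, hr5, List.foldl, h0, ge_iff_le, c1, c2, c3, c4,
          (by omega : ¬ (4:Int) ≤ f), (by omega : f ≤ 1)]
      · -- f ∈ {1, 2, 3}
        interval_cases f <;> simp [get_finger_candidates, pvAlt1, pvAlt2, pvAlt3] <;> decide
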